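-- pv_equiv track=rewrite | github.com/AI005/LAB2-CSTTNT | Bai3/main.py | parseClause
-- ===== SOURCE A (Python) =====
-- def parseClause(iterator):
--     clauses = []
--     flag = True
--     right = -1
--     left = 0
--     while flag:
--         try:
--             right = iterator.index('.', left)
--         except Exception as e:
--             break
--         clauses.append(iterator[left:right+1])
--         left = right + 1
--
--     return clauses
-- ===== SOURCE B (Python) =====
-- def parseClause(iterator):
--     # Split on '.' once; every piece except the trailing remainder is a clause
--     # (re-attach its terminating '.').
--     return [part + '.' for part in iterator.split('.')[:-1]]
-- ===== Notes on version B (the rewrite author's own statement) =====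
-- stated objective: idiomatic
-- what changed: Replaced A's while-loop of repeated str.index jumps with try/except control flow by a single library str.split('.') followed by a comprehension that re-attaches the '.' to every piece but the trailing remainder.
import Mathlib
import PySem

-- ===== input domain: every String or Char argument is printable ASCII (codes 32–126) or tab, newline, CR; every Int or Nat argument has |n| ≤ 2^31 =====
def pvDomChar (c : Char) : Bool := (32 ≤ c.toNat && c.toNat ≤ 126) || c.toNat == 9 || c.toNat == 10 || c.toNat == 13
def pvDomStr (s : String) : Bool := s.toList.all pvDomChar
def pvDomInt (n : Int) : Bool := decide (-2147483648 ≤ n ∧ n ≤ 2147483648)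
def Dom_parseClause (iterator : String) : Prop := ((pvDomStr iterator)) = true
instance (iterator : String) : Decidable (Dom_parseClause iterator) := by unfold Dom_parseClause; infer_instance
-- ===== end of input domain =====

-- B replaces A's while-loop of repeated .index jumps by one library split('.') plus a
-- comprehension re-attaching the dots (idiomatic; same cost). Claimed for String inputs.

-- ===== PORT A =====
-- A's while-loop: iterator.index('.', left) is PySem.Chars.findFrom; the except-branch is
-- the findFrom = -1 case; iterator[left:right+1] is PySem.List.slice.
-- 'fuel' only bounds the recursion depth (parseClause passes length+1, which the proof
-- shows is never exhausted); it adds no behaviour.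
def pvALoop (cs : List Char) (fuel : Nat) (left : Nat) : List (List Char) :=
  match fuel with
  | 0 => []
  | fuel + 1 =>
    if PySem.Chars.findFrom cs ['.'] (left : Int) = -1 then []
    else
      PySem.List.slice cs (some (left : Int))
          (some (PySem.Chars.findFrom cs ['.'] (left : Int) + 1)) ::
        pvALoop cs fuel ((PySem.Chars.findFrom cs ['.'] (left : Int)).toNat + 1)

def parseClause (iterator : String) : List String :=
  (pvALoop iterator.toList (iterator.toList.length + 1) 0).map String.ofList

-- ===== PORT B =====
-- Source B: iterator.split('.') is PySem.Chars.splitOn (sep ≠ ''); the slice [:-1] on the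
-- resulting list is exactly List.dropLast; the comprehension 'part + "."' is the map.
def parseClause_alt (iterator : String) : List String :=
  ((PySem.Chars.splitOn iterator.toList ['.']).dropLast.map (fun p => p ++ ['.'])).map
    String.ofList

-- ===== PRECONDITION & SPEC =====
def Spec_parseClause (iterator : String) (out : List String) : Prop := out = parseClause_alt iterator
instance (iterator : String) (out : List String) : Decidable (Spec_parseClause iterator out) := by unfold Spec_parseClause; infer_instance

-- ===== CLAIM (what is proved, stated in full; the proofs are below) =====
def Claim_equal_parseClause : Prop := ∀ (iterator : String), Dom_parseClause iterator → Spec_parseClause iterator (parseClause iterator)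

-- ===== LEMMAS AND PROOFS =====

-- Reference function both ports are reduced to: walk the remaining characters with the
-- pending (already-scanned, dot-free) part of the current clause.
def pvRef (pend : List Char) : List Char → List (List Char)
  | [] => []
  | c :: rest => if c = '.' then (pend ++ [c]) :: pvRef [] rest else pvRef (pend ++ [c]) rest

-- Split pieces (Python str.split('.') semantics): the pieces between dots, last remainder kept.
def pvSp (pend : List Char) : List Char → List (List Char)
  | [] => [pend]
  | c :: rest => if c = '.' then pend :: pvSp [] rest else pvSp (pend ++ [c]) rest

lemma pvSingleton_prefix_iff (c : Char) (l : List Char) : [c] <+: l ↔ l.head? = some c := by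
  cases l with
  | nil => simp
  | cons a t =>
    constructor
    · rintro ⟨r, hr⟩
      cases hr
      rfl
    · intro h
      simp at h
      subst h
      exact ⟨t, rfl⟩

lemma pvRef_no_dot (pend : List Char) (l : List Char) (h : '.' ∉ l) : pvRef pend l = [] := by
  induction l generalizing pend with
  | nil => rfl
  | cons c rest ih =>
    have hc : c ≠ '.' := by intro hc; exact h (by simp [hc])
    simp only [pvRef, if_neg hc]
    exact ih _ (fun hm => h (by simp [hm]))

lemma pvRef_split (k : Nat) : ∀ (l pend : List Char),
    (∀ i, i < k → l[i]? ≠ some '.') → l[k]? = some '.' →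
    pvRef pend l = (pend ++ l.take (k + 1)) :: pvRef [] (l.drop (k + 1)) := by
  induction k with
  | zero =>
    intro l pend _ hk
    cases l with
    | nil => simp at hk
    | cons c rest =>
      simp at hk
      subst hk
      simp [pvRef]
  | succ k ih =>
    intro l pend hlt hk
    cases l with
    | nil => simp at hk
    | cons c rest =>
      have hc : c ≠ '.' := by
        have := hlt 0 (Nat.succ_pos _)
        simpa using this
      simp only [pvRef, if_neg hc]
      rw [ih rest (pend ++ [c]) (fun i hi => by simpa using hlt (i + 1) (by omega))
        (by simpa using hk)]
      simp

lemma pvALoop_eq (cs : List Char) :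
    ∀ (m j : Nat), j ≤ cs.length → cs.length - j < m →
      pvALoop cs m j = pvRef [] (cs.drop j) := by
  intro m
  induction m with
  | zero => intro j _ hm; omega
  | succ m ih =>
    intro j h hm
    by_cases hr : PySem.Chars.findFrom cs ['.'] (j : Int) = -1
    · simp only [pvALoop, if_pos hr]
      have hnin : ¬ ['.'] <:+: cs.drop j :=
        (PySem.Chars.findFrom_natCast_eq_neg_one_iff cs ['.'] j h).mp hr
      have hmem : '.' ∉ cs.drop j := by
        intro hmem
        rcases List.mem_iff_append.mp hmem with ⟨s, t, hst⟩
        exact hnin ⟨s, t, by simp [hst]⟩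
      exact (pvRef_no_dot _ _ hmem).symm
    · obtain ⟨h1, h2, h3⟩ := PySem.Chars.findFrom_natCast_spec cs ['.'] j h hr
      simp only [pvALoop, if_neg hr]
      set r := (PySem.Chars.findFrom cs ['.'] (j : Int)).toNat with hrdef
      have hjr : j ≤ r := by omega
      have hrfind : PySem.Chars.findFrom cs ['.'] (j : Int) = (r : Int) := by omega
      have hrdot : cs[r]? = some '.' := by
        rw [← List.head?_drop]
        exact (pvSingleton_prefix_iff '.' _).mp h2
      have hrlt : r < cs.length := (List.getElem?_eq_some_iff.mp hrdot).1
      have hno : ∀ i, i < r - j → (cs.drop j)[i]? ≠ some '.' := by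
        intro i hi hbad
        apply h3 (j + i) (by omega) (by omega)
        rw [pvSingleton_prefix_iff, List.head?_drop]
        rw [List.getElem?_drop] at hbad
        exact hbad
      have hdot : (cs.drop j)[r - j]? = some '.' := by
        rw [List.getElem?_drop]
        have : j + (r - j) = r := by omega
        rw [this]; exact hrdot
      rw [pvRef_split (r - j) (cs.drop j) [] hno hdot]
      congr 1
      · rw [hrfind]
        have hcast : (r : Int) + 1 = ((r + 1 : Nat) : Int) := by push_cast; ring
        rw [hcast, PySem.List.slice_natCast]
        have harith : r + 1 - j = r - j + 1 := by omega
        rw [harith]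
        simp
      · rw [List.drop_drop]
        have hidx : j + (r - j + 1) = r + 1 := by omega
        rw [hidx]
        exact ih (r + 1) (by omega) (by omega)

-- splitOn's fuelled worker computed: accumulator unreversed, current piece pending.
lemma pvGo_eq (l : List Char) : ∀ (fuel : Nat) (cur : List Char) (acc : List (List Char)),
    l.length < fuel →
    PySem.Chars.splitOn.go ['.'] fuel l cur acc = acc.reverse ++ pvSp cur.reverse l := by
  induction l with
  | nil =>
    intro fuel cur acc h
    match fuel with
    | fuel + 1 => simp [PySem.Chars.splitOn.go, pvSp]
  | cons c rest ih =>
    intro fuel cur acc h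
    match fuel with
    | fuel + 1 =>
      by_cases hc : c = '.'
      · subst hc
        have hpre : List.isPrefixOf ['.'] ('.' :: rest) = true := by simp [List.isPrefixOf]
        simp only [PySem.Chars.splitOn.go, hpre, if_true]
        rw [show List.drop ['.'].length ('.' :: rest) = rest from rfl,
          ih fuel [] (cur.reverse :: acc) (by simp at h; omega)]
        simp [pvSp]
      · have hpre : List.isPrefixOf ['.'] (c :: rest) = false := by
          simp [List.isPrefixOf]
          exact fun hbad => hc hbad.symm
        simp only [PySem.Chars.splitOn.go, hpre, Bool.false_eq_true, if_false]
        rw [ih fuel (c :: cur) acc (by simp at h; omega)]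
        simp [pvSp, hc]

lemma pvSplitOn_eq (cs : List Char) : PySem.Chars.splitOn cs ['.'] = pvSp [] cs := by
  unfold PySem.Chars.splitOn
  rw [pvGo_eq cs (cs.length + 1) [] [] (Nat.lt_succ_self _)]
  rfl

lemma pvSp_ne_nil (pend l : List Char) : pvSp pend l ≠ [] := by
  induction l generalizing pend with
  | nil => simp [pvSp]
  | cons c rest ih =>
    by_cases hc : c = '.'
    · simp [pvSp, hc]
    · simpa [pvSp, hc] using ih (pend ++ [c])

lemma pvSp_dropLast_map (l pend : List Char) :
    (pvSp pend l).dropLast.map (fun p => p ++ ['.']) = pvRef pend l := by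
  induction l generalizing pend with
  | nil => simp [pvSp, pvRef]
  | cons c rest ih =>
    by_cases hc : c = '.'
    · subst hc
      rw [show pvSp pend ('.' :: rest) = pend :: pvSp [] rest from by simp [pvSp],
        show pvRef pend ('.' :: rest) = (pend ++ ['.']) :: pvRef [] rest from by simp [pvRef],
        List.dropLast_cons_of_ne_nil (pvSp_ne_nil [] rest)]
      simp [ih []]
    · simp only [pvSp, if_neg hc, pvRef]
      exact ih (pend ++ [c])

lemma pvPorts_eq (iterator : String) : parseClause iterator = parseClause_alt iterator := by
  unfold parseClause parseClause_alt
  rw [pvALoop_eq iterator.toList (iterator.toList.length + 1) 0 (Nat.zero_le _) (by omega),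
    pvSplitOn_eq, pvSp_dropLast_map]
  simp

-- ===== VERDICT (by name: the statement is the Claim_ definition above) =====
theorem parseClause_spec : Claim_equal_parseClause := by
  intro iterator _
  unfold Spec_parseClause
  exact pvPorts_eq iterator
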